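-- pv_equiv track=rewrite | github.com/openalea-incubator/adel | adel/fit/axis_table_fitting.py | _create_index_plt_list
-- ===== SOURCE A (Python) =====
-- def _create_index_plt_list(plant_ids, first_axis_table_index_axis_list):
--     '''
--     Create plant indexes column.
--     :Parameters:
--         - `plant_ids` : the plant indexes.
--         - `first_axis_table_index_axis_list` : the axes column.
--     :Types:
--         - `plant_ids` : list
--         - `first_axis_table_index_axis_list` : list
--
--     :return: The plant indexes column.
--     :rtype: list
--     '''
--     index_plt_list = []
--     current_plant_index = 0
--     for plant_id in plant_ids:
--         start_index = current_plant_index + 1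
--         if 1 in first_axis_table_index_axis_list[start_index:]:
--             next_plant_first_row = first_axis_table_index_axis_list.index(1, start_index)
--         else:
--             next_plant_first_row = len(first_axis_table_index_axis_list)
--         current_plant_axes = first_axis_table_index_axis_list[current_plant_index:next_plant_first_row]
--         index_plt_list.extend([plant_id for current_plant_axis in current_plant_axes])
--         current_plant_index = next_plant_first_row
--     return index_plt_list
-- ===== SOURCE B (Python) =====
-- def _create_index_plt_list(plant_ids, first_axis_table_index_axis_list):
--     '''
--     Create plant indexes column.
--     Single linear scan: split the axes column into blocks at every 1 found
--     after position 0, then emit each plant id once per row of its block.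
--     '''
--     axes = first_axis_table_index_axis_list
--     bounds = [0] + [i for i, v in enumerate(axes) if i > 0 and v == 1] + [len(axes)]
--     out = []
--     for plant_id, start, end in zip(plant_ids, bounds, bounds[1:]):
--         out += [plant_id] * (end - start)
--     return out
-- ===== Notes on version B (the rewrite author's own statement) =====
-- stated objective: faster
-- what changed: Replaces the per-plant 'in'+'.index' rescans of the axes column by one linear pass that collects all block boundaries (positions of 1 after index 0) and then zips plant ids with consecutive boundary pairs.
import Mathlib
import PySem

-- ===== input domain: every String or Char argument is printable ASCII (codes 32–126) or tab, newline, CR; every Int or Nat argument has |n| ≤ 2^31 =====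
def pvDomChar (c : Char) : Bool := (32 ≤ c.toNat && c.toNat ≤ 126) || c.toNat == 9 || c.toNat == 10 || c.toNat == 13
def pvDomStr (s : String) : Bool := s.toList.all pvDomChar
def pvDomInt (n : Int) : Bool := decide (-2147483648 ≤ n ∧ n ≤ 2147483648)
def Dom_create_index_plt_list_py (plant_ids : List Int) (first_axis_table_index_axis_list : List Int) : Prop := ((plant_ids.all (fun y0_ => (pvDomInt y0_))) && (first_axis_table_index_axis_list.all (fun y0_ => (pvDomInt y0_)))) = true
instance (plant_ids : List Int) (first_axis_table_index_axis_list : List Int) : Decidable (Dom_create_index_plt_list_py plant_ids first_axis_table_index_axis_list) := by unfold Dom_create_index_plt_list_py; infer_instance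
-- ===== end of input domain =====

-- B replaces A's per-plant rescans ('1 in tail' + '.index') of the axes column by one
-- linear pass collecting all block boundaries, then zips plant ids with boundary pairs
-- (objective: faster).

-- ===== PORT A =====
-- one loop iteration of A: state = (index_plt_list, current_plant_index)
def pyA_step (fat : List Int) (st : List Int × Int) (plant_id : Int) : List Int × Int :=
  let start_index := st.2 + 1
  let tail := PySem.List.slice fat (some start_index) none
  -- 'fat.index(1, start_index)' (guarded by '1 in fat[start_index:]') is transliterated
  -- as start_index + position of the first 1 in that same tail slice
  let next_plant_first_row : Int :=
    if tail.contains 1 then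
      start_index + (((PySem.List.index? tail 1).getD 0 : Nat) : Int)
    else (fat.length : Int)
  let current_plant_axes := PySem.List.slice fat (some st.2) (some next_plant_first_row)
  (st.1 ++ current_plant_axes.map (fun _ => plant_id), next_plant_first_row)

def create_index_plt_list_py (plant_ids : List Int) (first_axis_table_index_axis_list : List Int) : List Int :=
  (plant_ids.foldl (pyA_step first_axis_table_index_axis_list) ([], 0)).1

-- ===== PORT B =====
def create_index_plt_list_py_alt (plant_ids : List Int) (first_axis_table_index_axis_list : List Int) : List Int :=
  let axes := first_axis_table_index_axis_list
  let bounds : List Int :=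
    0 :: (((PySem.List.enumerate axes).filter (fun p => decide (0 < p.1) && (p.2 == 1))).map (·.1)
          ++ [(axes.length : Int)])
  (plant_ids.zip (bounds.zip bounds.tail)).foldl
    (fun out pse => out ++ List.replicate (pse.2.2 - pse.2.1).toNat pse.1) []

-- ===== PRECONDITION & SPEC =====
def Spec_create_index_plt_list_py (plant_ids : List Int) (first_axis_table_index_axis_list : List Int) (out : List Int) : Prop := out = create_index_plt_list_py_alt plant_ids first_axis_table_index_axis_list
instance (plant_ids : List Int) (first_axis_table_index_axis_list : List Int) (out : List Int) : Decidable (Spec_create_index_plt_list_py plant_ids first_axis_table_index_axis_list out) := by unfold Spec_create_index_plt_list_py; infer_instance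

-- ===== CLAIM (what is proved, stated in full; the proofs are below) =====
def Claim_equal_create_index_plt_list_py : Prop := ∀ (plant_ids : List Int) (first_axis_table_index_axis_list : List Int), Dom_create_index_plt_list_py plant_ids first_axis_table_index_axis_list → Spec_create_index_plt_list_py plant_ids first_axis_table_index_axis_list (create_index_plt_list_py plant_ids first_axis_table_index_axis_list)

-- ===== LEMMAS AND PROOFS =====

-- the next block boundary after cur: first index > cur holding a 1, else the length
def nextB (fat : List Int) (cur : Nat) : Nat :=
  if 1 ∈ fat.drop (cur + 1) then cur + 1 + (fat.drop (cur + 1)).idxOf 1 else fat.length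

-- reference function both ports are reduced to
def refFn (fat : List Int) : List Int → Nat → List Int
  | [], _ => []
  | p :: ps, cur => List.replicate (nextB fat cur - cur) p ++ refFn fat ps (nextB fat cur)

-- the 1-positions of l, enumerated from s
def onesF (l : List Int) (s : Int) : List Int :=
  ((PySem.List.enumerate l s).filter (fun p => p.2 == 1)).map (·.1)

lemma onesF_cons (x : Int) (l : List Int) (s : Int) :
    onesF (x :: l) s = if x = 1 then s :: onesF l (s + 1) else onesF l (s + 1) := by
  simp [onesF, PySem.List.enumerate_cons]
  split_ifs with h <;> simp [h]

lemma onesF_eq_nil (l : List Int) (s : Int) (h : 1 ∉ l) : onesF l s = [] := by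
  induction l generalizing s with
  | nil => rfl
  | cons x l ih =>
    rw [onesF_cons]
    simp only [List.mem_cons, not_or] at h
    rw [if_neg (fun hx => h.1 hx.symm)]
    exact ih _ h.2

lemma idxOfQ_of_mem (l : List Int) (h : 1 ∈ l) : List.idxOf? 1 l = some (List.idxOf 1 l) := by
  induction l with
  | nil => cases h
  | cons x l ih =>
    by_cases hx : x = 1
    · subst hx; simp [List.idxOf?_cons, List.idxOf_cons_self]
    · rw [List.idxOf?_cons, List.idxOf_cons_ne _ hx]
      simp only [beq_iff_eq]
      rw [if_neg hx]
      have hm : 1 ∈ l := by rcases List.mem_cons.mp h with h1|h1; exacts [absurd h1.symm hx, h1]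
      rw [ih hm]; rfl

lemma onesF_of_mem (l : List Int) (s : Int) (h : 1 ∈ l) :
    onesF l s = (s + (List.idxOf 1 l : Int)) :: onesF (l.drop (List.idxOf 1 l + 1)) (s + (List.idxOf 1 l : Int) + 1) := by
  induction l generalizing s with
  | nil => cases h
  | cons x l ih =>
    rw [onesF_cons]
    by_cases hx : x = 1
    · subst hx
      simp [List.idxOf_cons_self]
    · rw [if_neg hx]
      have hm : 1 ∈ l := by rcases List.mem_cons.mp h with h1|h1; exacts [absurd h1.symm hx, h1]
      rw [ih _ hm, List.idxOf_cons_ne _ hx]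
      have hd : List.drop (List.idxOf 1 l + 1 + 1) (x :: l) = List.drop (List.idxOf 1 l + 1) l :=
        List.drop_succ_cons ..
      rw [Nat.succ_eq_add_one, hd]
      congr 1
      · push_cast; ring
      · congr 1; push_cast; ring

lemma mem_enumerate_fst_bounds (l : List Int) (p : Int × Int) (s : Int)
    (h : p ∈ PySem.List.enumerate l s) : s ≤ p.1 ∧ p.1 < s + l.length := by
  induction l generalizing s with
  | nil => simp [PySem.List.enumerate_nil] at h
  | cons x l ih =>
    rw [PySem.List.enumerate_cons] at h
    rcases List.mem_cons.mp h with h1 | h1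
    · subst h1; simp
    · have := ih _ h1; constructor <;> [omega; (simp; omega)]

-- relate B's filtered enumerate starting at 0 to onesF of a drop
lemma onesGT_eq (fat : List Int) (cur : Nat) :
    ((PySem.List.enumerate fat).filter (fun p => decide ((cur : Int) < p.1) && (p.2 == 1))).map (·.1)
      = onesF (fat.drop (cur + 1)) ((cur : Int) + 1) := by
  conv_lhs => rw [← List.take_append_drop (cur + 1) fat]
  rw [show PySem.List.enumerate (List.take (cur + 1) fat ++ List.drop (cur + 1) fat)
        = PySem.List.enumerate (List.take (cur + 1) fat) 0
          ++ PySem.List.enumerate (List.drop (cur + 1) fat) (0 + (List.take (cur + 1) fat).length) from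
      PySem.List.enumerate_append ..]
  rw [List.filter_append, List.map_append]
  have h1 : (PySem.List.enumerate (List.take (cur + 1) fat) 0).filter
      (fun p => decide ((cur : Int) < p.1) && (p.2 == 1)) = [] := by
    rw [List.filter_eq_nil_iff]
    intro p hp
    have hb := mem_enumerate_fst_bounds _ p _ hp
    have hlen : ((List.take (cur + 1) fat).length : Int) ≤ (cur : Int) + 1 := by
      simp only [List.length_take]; omega
    simp only [Bool.and_eq_true, decide_eq_true_eq, not_and]
    intro hc
    exfalso
    have h3 := hb.1
    have h4 := hb.2
    omega
  rw [h1]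
  simp only [List.map_nil, List.nil_append]
  have h2 : (PySem.List.enumerate (List.drop (cur + 1) fat) (0 + (List.take (cur + 1) fat).length)).filter
      (fun p => decide ((cur : Int) < p.1) && (p.2 == 1))
      = (PySem.List.enumerate (List.drop (cur + 1) fat) (0 + (List.take (cur + 1) fat).length)).filter
      (fun p => p.2 == 1) := by
    apply List.filter_congr
    intro p hp
    have hb := (mem_enumerate_fst_bounds _ p _ hp).1
    have : (cur : Int) < p.1 := by
      by_cases hc : cur + 1 ≤ fat.length
      · have hlen2 : (List.take (cur + 1) fat).length = cur + 1 := by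
          simp only [List.length_take]; omega
        rw [hlen2] at hb; push_cast at hb; omega
      · exfalso
        have hnil : List.drop (cur + 1) fat = [] := List.drop_eq_nil_of_le (by omega)
        rw [hnil] at hp
        simp [PySem.List.enumerate_nil] at hp
    simp [this]
  rw [h2]
  by_cases hc : cur + 1 ≤ fat.length
  · have : (0 : Int) + (List.take (cur + 1) fat).length = (cur : Int) + 1 := by
      simp only [List.length_take]; omega
    rw [this]; rfl
  · have hnil : List.drop (cur + 1) fat = [] := List.drop_eq_nil_of_le (by omega)
    rw [hnil]; rfl

lemma refFn_len (fat ps : List Int) : refFn fat ps fat.length = [] := by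
  induction ps with
  | nil => rfl
  | cons p ps ih =>
    have h1 : fat.drop (fat.length + 1) = [] := List.drop_eq_nil_of_le (by omega)
    have hn : nextB fat fat.length = fat.length := by
      unfold nextB; rw [h1]; simp
    simp [refFn, hn, ih]

lemma nextB_le (fat : List Int) (cur : Nat) (h : cur ≤ fat.length) :
    cur ≤ nextB fat cur ∧ nextB fat cur ≤ fat.length := by
  unfold nextB
  split_ifs with hm
  · have h1 : (fat.drop (cur + 1)).idxOf 1 < (fat.drop (cur + 1)).length := List.idxOf_lt_length_of_mem hm
    have h2 : (fat.drop (cur + 1)).length = fat.length - (cur + 1) := List.length_drop ..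
    omega
  · omega

-- one iteration of A's loop, at a reachable state
lemma pyA_step_eq (fat : List Int) (acc : List Int) (p : Int) (cur : Nat) (h : cur ≤ fat.length) :
    pyA_step fat (acc, (cur : Int)) p
      = (acc ++ List.replicate (nextB fat cur - cur) p, ((nextB fat cur : Nat) : Int)) := by
  unfold pyA_step
  have hs : ((cur : Int) + 1) = ((cur + 1 : Nat) : Int) := by push_cast; ring
  simp only [hs, PySem.List.slice_from_natCast]
  by_cases hm : 1 ∈ fat.drop (cur + 1)
  · have hcont : (fat.drop (cur + 1)).contains 1 = true := by
      simpa [List.contains_iff_mem] using hm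
    have hidx : PySem.List.index? (fat.drop (cur + 1)) 1 = some ((fat.drop (cur + 1)).idxOf 1) := by
      rw [PySem.List.index?_eq_idxOf?]; exact idxOfQ_of_mem _ hm
    have hnext : nextB fat cur = cur + 1 + (fat.drop (cur + 1)).idxOf 1 := by
      unfold nextB; rw [if_pos hm]
    have hn1 : ((cur + 1 : Nat) : Int) + (((fat.drop (cur + 1)).idxOf 1 : Nat) : Int)
        = ((nextB fat cur : Nat) : Int) := by rw [hnext]; push_cast; ring
    simp only [hcont, if_true, hidx, Option.getD_some, hn1]
    have hsl : PySem.List.slice fat (some (cur : Int)) (some ((nextB fat cur : Nat) : Int))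
        = (fat.drop cur).take (nextB fat cur - cur) := PySem.List.slice_natCast ..
    rw [hsl, List.map_const']
    congr 2
    have hb := nextB_le fat cur h
    simp [List.length_take, List.length_drop]
    omega
  · have hcont : (fat.drop (cur + 1)).contains 1 = false := by
      simpa [List.contains_iff_mem] using hm
    have hnext : nextB fat cur = fat.length := by unfold nextB; rw [if_neg hm]
    simp only [hcont, Bool.false_eq_true, if_false, hnext]
    have hsl : PySem.List.slice fat (some (cur : Int)) (some ((fat.length : Nat) : Int))
        = (fat.drop cur).take (fat.length - cur) := PySem.List.slice_natCast ..
    rw [hsl, List.map_const']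
    have hl : (List.take (fat.length - cur) (List.drop cur fat)).length = fat.length - cur := by
      simp only [List.length_take, List.length_drop]; omega
    rw [hl]

-- A's loop = refFn
lemma A_eq_ref (fat : List Int) :
    ∀ (ps acc : List Int) (cur : Nat), cur ≤ fat.length →
      (ps.foldl (pyA_step fat) (acc, (cur : Int))).1 = acc ++ refFn fat ps cur := by
  intro ps
  induction ps with
  | nil => intro acc cur h; simp [refFn]
  | cons p ps ih =>
    intro acc cur h
    have hle := nextB_le fat cur h
    simp only [List.foldl_cons, pyA_step_eq fat acc p cur h, ih _ _ hle.2]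
    simp [refFn]

-- B's zip/flatMap = refFn
lemma B_eq_ref (fat : List Int) :
    ∀ (ps : List Int) (cur : Nat), cur ≤ fat.length →
      ((ps.zip ((((cur : Int) :: (onesF (fat.drop (cur + 1)) ((cur : Int) + 1) ++ [(fat.length : Int)]))).zip
          (onesF (fat.drop (cur + 1)) ((cur : Int) + 1) ++ [(fat.length : Int)]))).flatMap
        (fun pse => List.replicate (pse.2.2 - pse.2.1).toNat pse.1))
      = refFn fat ps cur := by
  intro ps
  induction ps with
  | nil => intro cur h; simp [refFn]
  | cons p ps ih =>
    intro cur h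
    by_cases hm : 1 ∈ fat.drop (cur + 1)
    · have hidx : (fat.drop (cur + 1)).idxOf 1 < (fat.drop (cur + 1)).length := List.idxOf_lt_length_of_mem hm
      have hlen : (fat.drop (cur + 1)).length = fat.length - (cur + 1) := List.length_drop ..
      have hnext : nextB fat cur = cur + 1 + (fat.drop (cur + 1)).idxOf 1 := by
        unfold nextB; rw [if_pos hm]
      have hnb := nextB_le fat cur h
      have hones : onesF (fat.drop (cur + 1)) ((cur : Int) + 1)
          = ((nextB fat cur : Nat) : Int)
            :: onesF (fat.drop (nextB fat cur + 1)) (((nextB fat cur : Nat) : Int) + 1) := by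
        rw [onesF_of_mem _ _ hm]
        have hdd : (fat.drop (cur + 1)).drop ((fat.drop (cur + 1)).idxOf 1 + 1)
            = fat.drop (nextB fat cur + 1) := by
          rw [List.drop_drop, show cur + 1 + ((fat.drop (cur + 1)).idxOf 1 + 1) = nextB fat cur + 1 from by omega]
        rw [hdd]
        congr 1
        · rw [hnext]; push_cast; ring
        · congr 1; rw [hnext]; push_cast; ring
      rw [hones]
      simp only [List.cons_append, List.zip_cons_cons, List.flatMap_cons]
      rw [ih (nextB fat cur) hnb.2]
      simp only [refFn]
      congr 1
      have : (((nextB fat cur : Nat) : Int) - (cur : Int)).toNat = nextB fat cur - cur := by omega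
      rw [this]
    · have hnil : onesF (fat.drop (cur + 1)) ((cur : Int) + 1) = [] := onesF_eq_nil _ _ hm
      have hnext : nextB fat cur = fat.length := by unfold nextB; rw [if_neg hm]
      rw [hnil]
      simp only [List.nil_append, List.zip_cons_cons, List.flatMap_cons, List.zip_nil_right,
        List.flatMap_nil, List.append_nil]
      simp only [refFn, hnext, refFn_len, List.append_nil]
      congr 1
      omega

-- ===== VERDICT (by name: the statement is the Claim_ definition above) =====
theorem create_index_plt_list_py_spec : Claim_equal_create_index_plt_list_py := by
  intro ps fat _
  unfold Spec_create_index_plt_list_py create_index_plt_list_py create_index_plt_list_py_alt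
  have hA : (ps.foldl (pyA_step fat) ([], ((0 : Nat) : Int))).1 = [] ++ refFn fat ps 0 :=
    A_eq_ref fat ps [] 0 (by omega)
  simp only [Nat.cast_zero, List.nil_append] at hA
  rw [hA]
  rw [PySem.List.foldl_append_eq_flatMap]
  have hB := B_eq_ref fat ps 0 (by omega)
  simp only [Nat.cast_zero, zero_add] at hB
  rw [← hB]
  have hg := onesGT_eq fat 0
  simp only [Nat.cast_zero, zero_add] at hg
  rw [hg]
  simp only [List.nil_append, List.tail_cons]
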